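-- pv_equiv track=rewrite | github.com/Haskkor/ADS | Rendus MP/217972-213745-1ADS-Toulouse-MP-MEKRAOUI_PARIZOT/217972-1ADS-Toulouse-MP/alignements.py | alignementD1
-- ===== SOURCE A (Python) =====
-- def alignementD1(taille,plateau,win,joueur):
--     #diaginferieures
--     for i in range(taille):
--         cpt=0
--         for j in range (taille-i):
--             if plateau[taille-j-1][i+j] == joueur:
--                 cpt+=1
--                 if cpt == win:
--                     return True
--             else:
--                 cpt=0
--     #diagsuperieures
--     for i in range(taille):
--         cpt=0
--         for j in range (taille-i):
--             if plateau[taille-i-j-1][j] == joueur: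
--                 cpt+=1
--                 if cpt == win:
--                     return True
--             else:
--                 cpt=0
--     return False
-- ===== SOURCE B (Python) =====
-- def alignementD1(taille, plateau, win, joueur):
--     # Enumerate each anti-diagonal once by its constant sum s = row + col,
--     # collect its cells, and look for a window of `win` cells equal to joueur.
--     if win < 1:
--         return False
--     for s in range(2 * taille - 1):
--         cells = [plateau[s - c][c]
--                  for c in range(max(0, s - taille + 1), min(taille, s + 1))]
--         for k in range(len(cells) - win + 1):
--             if all(x == joueur for x in cells[k:k + win]):
--                 return True
--     return False
-- ===== Notes on version B (the rewrite author's own statement) =====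
-- stated objective: alternative
-- what changed: B enumerates each anti-diagonal once by its constant sum s = row+col, materialises the diagonal's cells as a list, and tests it for a length-win all-joueur window via slices, instead of A's two nested index loops (lower then upper diagonals) with a reset counter.
-- outside the precondition, e.g. on alignementD1(3, [[], [0, 1], [0]], 1, 1): A returns True, B raises IndexError; on alignementD1(2, [[1, 1], [1]], 1, 1): A returns True, B returns True
import Mathlib
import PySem

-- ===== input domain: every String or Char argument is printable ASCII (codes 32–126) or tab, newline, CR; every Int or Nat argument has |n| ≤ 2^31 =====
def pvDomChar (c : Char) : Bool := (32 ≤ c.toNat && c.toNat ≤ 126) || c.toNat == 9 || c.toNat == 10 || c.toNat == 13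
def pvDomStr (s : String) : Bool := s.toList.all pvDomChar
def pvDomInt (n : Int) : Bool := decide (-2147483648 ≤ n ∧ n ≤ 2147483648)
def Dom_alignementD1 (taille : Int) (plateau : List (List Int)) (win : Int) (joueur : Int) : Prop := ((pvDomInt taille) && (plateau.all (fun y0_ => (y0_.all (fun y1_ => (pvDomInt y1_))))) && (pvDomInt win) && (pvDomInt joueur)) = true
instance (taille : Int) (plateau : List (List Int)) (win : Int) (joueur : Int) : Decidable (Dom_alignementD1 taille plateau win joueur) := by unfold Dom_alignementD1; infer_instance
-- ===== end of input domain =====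

-- B enumerates each anti-diagonal once by its constant coordinate sum and tests it for an
-- all-joueur window of length win, instead of A's two nested index loops with a reset counter;
-- objective: alternative (same cost class, different decomposition).

-- ===== PORT A =====
-- plateau[r][c]; exact wherever the indices are in range (guaranteed by Pre_alignementD1)
def pvCell (plateau : List (List Int)) (r c : Int) : Int :=
  PySem.List.pyGetD (PySem.List.pyGetD plateau r []) c 0

-- inner loop of the first ("diaginferieures") pass: j runs over pyRange 0 (taille-i) 1
def pvALower (taille : Int) (plateau : List (List Int)) (win joueur i : Int) :
    List Int → Int → Bool
  | [], _ => false
  | j :: js, cpt =>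
    if pvCell plateau (taille - j - 1) (i + j) == joueur then
      if cpt + 1 == win then true else pvALower taille plateau win joueur i js (cpt + 1)
    else pvALower taille plateau win joueur i js 0

-- inner loop of the second ("diagsuperieures") pass
def pvAUpper (taille : Int) (plateau : List (List Int)) (win joueur i : Int) :
    List Int → Int → Bool
  | [], _ => false
  | j :: js, cpt =>
    if pvCell plateau (taille - i - j - 1) j == joueur then
      if cpt + 1 == win then true else pvAUpper taille plateau win joueur i js (cpt + 1)
    else pvAUpper taille plateau win joueur i js 0

def pvAOuter1 (taille : Int) (plateau : List (List Int)) (win joueur : Int) :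
    List Int → Bool
  | [] => false
  | i :: is =>
    if pvALower taille plateau win joueur i (PySem.List.pyRange 0 (taille - i) 1) 0 then true
    else pvAOuter1 taille plateau win joueur is

def pvAOuter2 (taille : Int) (plateau : List (List Int)) (win joueur : Int) :
    List Int → Bool
  | [] => false
  | i :: is =>
    if pvAUpper taille plateau win joueur i (PySem.List.pyRange 0 (taille - i) 1) 0 then true
    else pvAOuter2 taille plateau win joueur is

def alignementD1 (taille : Int) (plateau : List (List Int)) (win : Int) (joueur : Int) : Bool :=
  if pvAOuter1 taille plateau win joueur (PySem.List.pyRange 0 taille 1) then true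
  else pvAOuter2 taille plateau win joueur (PySem.List.pyRange 0 taille 1)

-- ===== PORT B =====
-- cells of the anti-diagonal row+col = s, columns ascending
def pvDiag (taille : Int) (plateau : List (List Int)) (s : Int) : List Int :=
  (PySem.List.pyRange (max 0 (s - taille + 1)) (min taille (s + 1)) 1).map
    (fun c => pvCell plateau (s - c) c)

-- inner loop: k runs over pyRange 0 (len cells - win + 1) 1
def pvBWin (cells : List Int) (win joueur : Int) : List Int → Bool
  | [] => false
  | k :: ks =>
    if (PySem.List.slice cells (some k) (some (k + win))).all (fun x => x == joueur) then true
    else pvBWin cells win joueur ks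

def pvBOuter (taille : Int) (plateau : List (List Int)) (win joueur : Int) :
    List Int → Bool
  | [] => false
  | s :: ss =>
    let cells := pvDiag taille plateau s
    if pvBWin cells win joueur
        (PySem.List.pyRange 0 (PySem.List.len cells - win + 1) 1) then true
    else pvBOuter taille plateau win joueur ss

def alignementD1_alt (taille : Int) (plateau : List (List Int)) (win : Int) (joueur : Int) : Bool :=
  if win < 1 then false
  else pvBOuter taille plateau win joueur (PySem.List.pyRange 0 (2 * taille - 1) 1)

-- ===== PRECONDITION & SPEC =====
-- Pre_ excludes undersized boards (fewer than taille rows, or a needed row shorter than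
-- taille), on which Python A raises IndexError except when an early alignment happens to
-- return True before the missing cell is read: those accidental early returns are excluded too.
def Pre_alignementD1 (taille : Int) (plateau : List (List Int)) (win : Int) (joueur : Int) : Prop :=
  taille ≤ (plateau.length : Int) ∧
    ∀ row ∈ plateau.take taille.toNat, taille ≤ (row.length : Int)
instance (taille : Int) (plateau : List (List Int)) (win : Int) (joueur : Int) : Decidable (Pre_alignementD1 taille plateau win joueur) := by unfold Pre_alignementD1; infer_instance

def pvWitness_alignementD1 : Int × List (List Int) × Int × Int := (2, [[1, 0], [0, 1]], 2, 1)

def Spec_alignementD1 (taille : Int) (plateau : List (List Int)) (win : Int) (joueur : Int) (out : Bool) : Prop := out = alignementD1_alt taille plateau win joueur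
instance (taille : Int) (plateau : List (List Int)) (win : Int) (joueur : Int) (out : Bool) : Decidable (Spec_alignementD1 taille plateau win joueur out) := by unfold Spec_alignementD1; infer_instance

-- ===== CLAIM (what is proved, stated in full; the proofs are below) =====
def Claim_equal_alignementD1 : Prop := ∀ (taille : Int) (plateau : List (List Int)) (win : Int) (joueur : Int), Dom_alignementD1 taille plateau win joueur → Pre_alignementD1 taille plateau win joueur → Spec_alignementD1 taille plateau win joueur (alignementD1 taille plateau win joueur)

-- ===== LEMMAS AND PROOFS =====

-- value-level reset-counter scan: what A's inner loops compute over a list of cell values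
def pvScan (win joueur : Int) : List Int → Int → Bool
  | [], _ => false
  | x :: xs, cpt =>
    if x == joueur then
      if cpt + 1 == win then true else pvScan win joueur xs (cpt + 1)
    else pvScan win joueur xs 0

-- "l has a contiguous block of win.toNat cells all equal to joueur"
def pvHasRun (win joueur : Int) (l : List Int) : Prop :=
  ∃ k : Nat, k + win.toNat ≤ l.length ∧ ∀ x ∈ (l.drop k).take win.toNat, x = joueur

theorem pvScan_neg (win joueur : Int) (hw : win ≤ 0) :
    ∀ (l : List Int) (cpt : Int), 0 ≤ cpt → pvScan win joueur l cpt = false := by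
  intro l
  induction l with
  | nil => intro cpt _; rfl
  | cons x xs ih =>
    intro cpt hc
    simp only [pvScan]
    by_cases hx : (x == joueur) = true
    · have h1 : (cpt + 1 == win) = false := by simp only [beq_eq_false_iff_ne, ne_eq]; omega
      simp only [hx, if_true, h1, Bool.false_eq_true, if_false]
      exact ih (cpt + 1) (by omega)
    · simp only [eq_false hx, if_false]
      exact ih 0 le_rfl

theorem pvTake_mono {l : List Int} {a b : Nat} (h : a ≤ b) {y : Int}
    (hy : y ∈ l.take a) : y ∈ l.take b := by
  have : l.take a = (l.take b).take a := by rw [List.take_take]; congr 1; omega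
  rw [this] at hy
  exact List.take_subset _ _ hy

theorem pvScan_char (win joueur : Int) (hw : 1 ≤ win) :
    ∀ (l : List Int) (cpt : Int), 0 ≤ cpt → cpt < win →
      (pvScan win joueur l cpt = true ↔
        (((win - cpt).toNat ≤ l.length ∧ ∀ x ∈ l.take (win - cpt).toNat, x = joueur) ∨
          pvHasRun win joueur l)) := by
  intro l
  induction l with
  | nil =>
    intro cpt h0 hlt
    simp only [pvScan, pvHasRun]
    constructor
    · intro h; exact absurd h (by simp)
    · rintro (⟨hlen, _⟩ | ⟨k, hk, _⟩)
      · simp only [List.length_nil] at hlen; omega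
      · simp only [List.length_nil] at hk; omega
  | cons x xs ih =>
    intro cpt h0 hlt
    simp only [pvScan]
    by_cases hx : x = joueur
    · have hxb : (x == joueur) = true := by simp [hx]
      simp only [hxb, if_true]
      by_cases he : cpt + 1 = win
      · have hb : (cpt + 1 == win) = true := by simp [he]
        simp only [hb, if_true, true_iff]
        left
        have h1 : (win - cpt).toNat = 1 := by omega
        rw [h1]
        refine ⟨by simp, ?_⟩
        intro y hy
        simp only [List.take_succ_cons, List.take_zero, List.mem_singleton] at hy
        rw [hy]; exact hx
      · have hb : (cpt + 1 == win) = false := by simp [he]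
        simp only [hb, Bool.false_eq_true, if_false]
        rw [ih (cpt + 1) (by omega) (by omega)]
        have h1 : (win - cpt).toNat = (win - (cpt + 1)).toNat + 1 := by omega
        constructor
        · rintro (⟨hlen, hall⟩ | ⟨k, hk, hall⟩)
          · left
            rw [h1]
            refine ⟨by simp only [List.length_cons]; omega, ?_⟩
            intro y hy
            simp only [List.take_succ_cons, List.mem_cons] at hy
            rcases hy with rfl | hy
            · exact hx
            · exact hall y hy
          · right
            refine ⟨k + 1, by simp only [List.length_cons]; omega, ?_⟩
            simpa only [List.drop_succ_cons] using hall
        · rintro (⟨hlen, hall⟩ | ⟨k, hk, hall⟩)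
          · left
            rw [h1] at hlen hall
            simp only [List.length_cons, add_le_add_iff_right] at hlen
            refine ⟨hlen, ?_⟩
            intro y hy
            apply hall
            simp only [List.take_succ_cons, List.mem_cons]
            right; exact hy
          · cases k with
            | zero =>
              left
              simp only [List.drop_zero, List.length_cons] at hk hall
              have hw1 : 1 ≤ win.toNat := by omega
              have htake : (x :: xs).take win.toNat = x :: xs.take (win.toNat - 1) := by
                obtain ⟨m, hm⟩ : ∃ m, win.toNat = m + 1 := ⟨win.toNat - 1, by omega⟩
                rw [hm, List.take_succ_cons, Nat.add_sub_cancel]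
              rw [htake] at hall
              refine ⟨by omega, ?_⟩
              intro y hy
              apply hall
              simp only [List.mem_cons]
              right
              exact pvTake_mono (by omega) hy
            | succ k' =>
              right
              refine ⟨k', by simp only [List.length_cons] at hk; omega, ?_⟩
              simpa only [List.drop_succ_cons] using hall
    · have hxb : (x == joueur) = false := by simp [hx]
      simp only [hxb, Bool.false_eq_true, if_false]
      rw [ih 0 le_rfl (by omega)]
      have hw1 : 1 ≤ win.toNat := by omega
      have hcpt1 : 1 ≤ (win - cpt).toNat := by omega
      constructor
      · rintro (⟨hlen, hall⟩ | ⟨k, hk, hall⟩)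
        · -- Completes xs 0 is a run at position 1 of x :: xs
          right
          refine ⟨1, by simp only [List.length_cons]; omega, ?_⟩
          simp only [List.drop_succ_cons, List.drop_zero]
          intro y hy
          apply hall
          have : (win - 0).toNat = win.toNat := by omega
          rw [this]
          exact hy
        · right
          refine ⟨k + 1, by simp only [List.length_cons]; omega, ?_⟩
          simpa only [List.drop_succ_cons] using hall
      · rintro (⟨hlen, hall⟩ | ⟨k, hk, hall⟩)
        · exfalso
          apply hx
          apply hall
          have : (win - cpt).toNat = ((win - cpt).toNat - 1) + 1 := by omega
          rw [this, List.take_succ_cons]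
          exact List.mem_cons_self
        · cases k with
          | zero =>
            exfalso
            apply hx
            simp only [List.drop_zero] at hall
            apply hall
            have : win.toNat = (win.toNat - 1) + 1 := by omega
            rw [this, List.take_succ_cons]
            exact List.mem_cons_self
          | succ k' =>
            right
            refine ⟨k', by simp only [List.length_cons] at hk; omega, ?_⟩
            simpa only [List.drop_succ_cons] using hall

theorem pvScan_iff_hasRun (win joueur : Int) (hw : 1 ≤ win) (l : List Int) :
    pvScan win joueur l 0 = true ↔ pvHasRun win joueur l := by
  rw [pvScan_char win joueur hw l 0 le_rfl (by omega)]
  constructor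
  · rintro (⟨hlen, hall⟩ | h)
    · refine ⟨0, by simpa using hlen, ?_⟩
      simpa using hall
    · exact h
  · intro h; right; exact h

theorem pvBWin_any (cells : List Int) (win joueur : Int) (ks : List Int) :
    pvBWin cells win joueur ks = ks.any
      (fun k => (PySem.List.slice cells (some k) (some (k + win))).all (fun x => x == joueur)) := by
  induction ks with
  | nil => rfl
  | cons a as ih => simp only [pvBWin, List.any_cons, ih]; split <;> rename_i h <;> simp [h]

theorem pvBWin_char (win joueur : Int) (hw : 1 ≤ win) (l : List Int) :
    pvBWin l win joueur (PySem.List.pyRange 0 (PySem.List.len l - win + 1) 1) = true ↔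
      pvHasRun win joueur l := by
  rw [pvBWin_any, List.any_eq_true]
  constructor
  · rintro ⟨k, hmem, hpred⟩
    rw [PySem.List.mem_pyRange_one] at hmem
    obtain ⟨hk0, hklt⟩ := hmem
    rw [PySem.List.len_eq] at hklt
    rw [PySem.List.slice_toNat l hk0 (by omega)] at hpred
    have he : (k + win).toNat - k.toNat = win.toNat := by omega
    rw [he, List.all_eq_true] at hpred
    refine ⟨k.toNat, by omega, ?_⟩
    intro y hy
    simpa using hpred y hy
  · rintro ⟨k, hk, hall⟩
    refine ⟨(k : Int), ?_, ?_⟩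
    · rw [PySem.List.mem_pyRange_one, PySem.List.len_eq]
      constructor
      · positivity
      · omega
    · rw [PySem.List.slice_toNat l (by positivity) (by omega)]
      have he : ((k : Int) + win).toNat - ((k : Int)).toNat = win.toNat := by omega
      rw [he, List.all_eq_true]
      intro y hy
      simp only [beq_iff_eq]
      apply hall
      simpa using hy

theorem pvALower_eq_scan (t : Int) (p : List (List Int)) (w j i : Int) :
    ∀ (js : List Int) (cpt : Int),
      pvALower t p w j i js cpt =
        pvScan w j (js.map (fun k => pvCell p (t - k - 1) (i + k))) cpt := by
  intro js
  induction js with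
  | nil => intro cpt; rfl
  | cons a as ih => intro cpt; simp only [pvALower, List.map, pvScan, ih]

theorem pvAUpper_eq_scan (t : Int) (p : List (List Int)) (w j i : Int) :
    ∀ (js : List Int) (cpt : Int),
      pvAUpper t p w j i js cpt =
        pvScan w j (js.map (fun k => pvCell p (t - i - k - 1) k)) cpt := by
  intro js
  induction js with
  | nil => intro cpt; rfl
  | cons a as ih => intro cpt; simp only [pvAUpper, List.map, pvScan, ih]

theorem pvAOuter1_any (t : Int) (p : List (List Int)) (w j : Int) (is : List Int) :
    pvAOuter1 t p w j is =
      is.any (fun i => pvALower t p w j i (PySem.List.pyRange 0 (t - i) 1) 0) := by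
  induction is with
  | nil => rfl
  | cons a as ih => simp only [pvAOuter1, List.any_cons, ih]; split <;> rename_i h <;> simp [h]

theorem pvAOuter2_any (t : Int) (p : List (List Int)) (w j : Int) (is : List Int) :
    pvAOuter2 t p w j is =
      is.any (fun i => pvAUpper t p w j i (PySem.List.pyRange 0 (t - i) 1) 0) := by
  induction is with
  | nil => rfl
  | cons a as ih => simp only [pvAOuter2, List.any_cons, ih]; split <;> rename_i h <;> simp [h]

theorem pvBOuter_any (t : Int) (p : List (List Int)) (w j : Int) (ss : List Int) :
    pvBOuter t p w j ss =
      ss.any (fun s => pvBWin (pvDiag t p s) w j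
        (PySem.List.pyRange 0 (PySem.List.len (pvDiag t p s) - w + 1) 1)) := by
  induction ss with
  | nil => rfl
  | cons a as ih =>
    simp only [pvBOuter, List.any_cons, ih]
    split <;> rename_i h <;> simp only [PySem.List.len_eq] at h <;> simp [h]

-- the cell list A's lower pass scans for i equals the anti-diagonal s = t-1+i
theorem pvLower_cells (t : Int) (p : List (List Int)) (i : Int) (h0 : 0 ≤ i) :
    (PySem.List.pyRange 0 (t - i) 1).map (fun k => pvCell p (t - k - 1) (i + k)) =
      pvDiag t p (t - 1 + i) := by
  have h1 : max 0 (t - 1 + i - t + 1) = i := by omega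
  have h2 : min t (t - 1 + i + 1) = t := by omega
  simp only [pvDiag, h1, h2, PySem.List.pyRange_one, List.map_map]
  have h3 : (t - i - 0).toNat = (t - i).toNat := by omega
  rw [h3]
  apply List.map_congr_left
  intro k hk
  simp only [Function.comp]
  have e1 : t - (0 + (k : Int)) - 1 = t - 1 + i - (i + k) := by ring
  have e2 : i + (0 + (k : Int)) = i + k := by ring
  rw [e1, e2]

-- the cell list A's upper pass scans for i equals the anti-diagonal s = t-1-i
theorem pvUpper_cells (t : Int) (p : List (List Int)) (i : Int) (h0 : 0 ≤ i) :
    (PySem.List.pyRange 0 (t - i) 1).map (fun k => pvCell p (t - i - k - 1) k) =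
      pvDiag t p (t - 1 - i) := by
  have h1 : max 0 (t - 1 - i - t + 1) = 0 := by omega
  have h2 : min t (t - 1 - i + 1) = t - i := by omega
  simp only [pvDiag, h1, h2]
  apply List.map_congr_left
  intro c hc
  have e1 : t - i - c - 1 = t - 1 - i - c := by ring
  rw [e1]

-- A is its two any-passes or-ed together
theorem pvA_or (t : Int) (p : List (List Int)) (w j : Int) :
    alignementD1 t p w j =
      (pvAOuter1 t p w j (PySem.List.pyRange 0 t 1) ||
        pvAOuter2 t p w j (PySem.List.pyRange 0 t 1)) := by
  cases h : pvAOuter1 t p w j (PySem.List.pyRange 0 t 1) <;> simp [alignementD1, h]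

theorem pvA_true_iff (t : Int) (p : List (List Int)) (w j : Int) (hw : 1 ≤ w) :
    alignementD1 t p w j = true ↔
      ∃ s : Int, (0 ≤ s ∧ s < 2 * t - 1) ∧ pvHasRun w j (pvDiag t p s) := by
  rw [pvA_or, Bool.or_eq_true, pvAOuter1_any, pvAOuter2_any]
  simp only [List.any_eq_true, PySem.List.mem_pyRange_one]
  constructor
  · rintro (⟨i, ⟨hi0, hit⟩, h⟩ | ⟨i, ⟨hi0, hit⟩, h⟩)
    · rw [pvALower_eq_scan, pvLower_cells t p i hi0, pvScan_iff_hasRun w j hw] at h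
      exact ⟨t - 1 + i, ⟨by omega, by omega⟩, h⟩
    · rw [pvAUpper_eq_scan, pvUpper_cells t p i hi0, pvScan_iff_hasRun w j hw] at h
      exact ⟨t - 1 - i, ⟨by omega, by omega⟩, h⟩
  · rintro ⟨s, ⟨hs0, hs2⟩, h⟩
    by_cases hcase : t - 1 ≤ s
    · left
      refine ⟨s - t + 1, ⟨by omega, by omega⟩, ?_⟩
      rw [pvALower_eq_scan, pvLower_cells t p _ (by omega), pvScan_iff_hasRun w j hw]
      have e : t - 1 + (s - t + 1) = s := by ring
      rw [e]
      exact h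
    · right
      refine ⟨t - 1 - s, ⟨by omega, by omega⟩, ?_⟩
      rw [pvAUpper_eq_scan, pvUpper_cells t p _ (by omega), pvScan_iff_hasRun w j hw]
      have e : t - 1 - (t - 1 - s) = s := by ring
      rw [e]
      exact h

theorem pvB_true_iff (t : Int) (p : List (List Int)) (w j : Int) (hw : ¬ w < 1) :
    alignementD1_alt t p w j = true ↔
      ∃ s : Int, (0 ≤ s ∧ s < 2 * t - 1) ∧ pvHasRun w j (pvDiag t p s) := by
  rw [alignementD1_alt, if_neg hw, pvBOuter_any]
  simp only [List.any_eq_true, PySem.List.mem_pyRange_one]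
  constructor
  · rintro ⟨s, hs, h⟩
    exact ⟨s, hs, (pvBWin_char w j (by omega) _).mp h⟩
  · rintro ⟨s, hs, h⟩
    exact ⟨s, hs, (pvBWin_char w j (by omega) _).mpr h⟩

-- ===== VERDICT (by name: the statement is the Claim_ definition above) =====
theorem alignementD1_spec : Claim_equal_alignementD1 := by
  intro t p w j _ _
  unfold Spec_alignementD1
  by_cases hw : w < 1
  · rw [alignementD1_alt, if_pos hw, pvA_or]
    have h1 : pvAOuter1 t p w j (PySem.List.pyRange 0 t 1) = false := by
      rw [pvAOuter1_any]
      apply List.any_eq_false.mpr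
      intro i _
      rw [pvALower_eq_scan]
      simp [pvScan_neg w j (by omega) _ 0 le_rfl]
    have h2 : pvAOuter2 t p w j (PySem.List.pyRange 0 t 1) = false := by
      rw [pvAOuter2_any]
      apply List.any_eq_false.mpr
      intro i _
      rw [pvAUpper_eq_scan]
      simp [pvScan_neg w j (by omega) _ 0 le_rfl]
    rw [h1, h2]
    rfl
  · rw [Bool.eq_iff_iff, pvA_true_iff t p w j (by omega), pvB_true_iff t p w j hw]
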